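-- pv_equiv track=rewrite | github.com/Aasthaengg/IBMdataset | Python_codes/p03285/s761589439.py | actual
-- ===== SOURCE A (Python) =====
-- def actual(N):
--     oks = []
--
--     for idx, n in enumerate(range(4, 104, 4), start=1):
--         for i in range(idx + 1):
--             satisfied_value = n + (3 * i)
--
--             if satisfied_value <= 100:
--                 oks.append(satisfied_value)
--
--     oks = sorted(set(oks))
--
--     if N in oks:
--         return 'Yes'
--
--     return 'No'
-- ===== SOURCE B (Python) =====
-- def actual(N):
--     if N < 1 or N > 100:
--         return 'No'
--     for a in range(N // 4 + 1):
--         if (N - 4 * a) % 7 == 0: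
--             return 'Yes'
--     return 'No'
-- ===== Notes on version B (the rewrite author's own statement) =====
-- stated objective: simpler
-- what changed: Instead of precomputing, deduplicating and sorting the whole table of values 4a+7b up to 100 and testing membership, B range-checks N (1..100) and searches directly for a decomposition N = 4a + 7b by trying each a with 4a <= N and testing (N - 4a) % 7 == 0.
import Mathlib
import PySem

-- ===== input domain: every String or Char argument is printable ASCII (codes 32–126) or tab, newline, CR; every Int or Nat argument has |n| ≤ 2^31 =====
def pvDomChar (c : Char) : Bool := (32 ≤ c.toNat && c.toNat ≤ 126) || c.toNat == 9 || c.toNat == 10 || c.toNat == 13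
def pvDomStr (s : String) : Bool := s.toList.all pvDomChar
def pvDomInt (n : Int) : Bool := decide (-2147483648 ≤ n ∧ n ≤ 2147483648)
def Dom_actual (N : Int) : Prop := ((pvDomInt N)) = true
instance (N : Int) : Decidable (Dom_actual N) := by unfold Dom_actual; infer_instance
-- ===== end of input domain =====

-- B tests N directly for a representation N = 4*a + 7*b (with the same 1..100 bounds A's
-- precomputed table imposes) instead of building, deduplicating and sorting the whole table: simpler.

-- ===== PORT A =====
-- the table-building part of A (independent of N): for idx, n in enumerate(range(4,104,4), start=1): for i in range(idx+1): ...
def buildOks : List Int :=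
  (PySem.List.enumerate (PySem.List.pyRange 4 104 4) 1).foldl
    (fun oks p =>
      (PySem.List.pyRange 0 (p.1 + 1) 1).foldl
        (fun oks i =>
          let satisfiedValue := p.2 + 3 * i
          if satisfiedValue <= 100 then oks ++ [satisfiedValue] else oks)
        oks)
    []

def actual (N : Int) : String :=
  let oks := PySem.List.sorted (PySem.Set.ofList buildOks) (fun x => x) false
  if oks.contains N then "Yes" else "No"

-- ===== PORT B =====
def actual_alt (N : Int) : String :=
  if N < 1 ∨ 100 < N then "No"
  else if (PySem.List.pyRange 0 (PySem.Int.floordiv N 4 + 1) 1).any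
            (fun a => PySem.Int.mod (N - 4 * a) 7 == 0) then "Yes"
  else "No"

-- ===== PRECONDITION & SPEC =====
def Spec_actual (N : Int) (out : String) : Prop := out = actual_alt N
instance (N : Int) (out : String) : Decidable (Spec_actual N out) := by unfold Spec_actual; infer_instance

-- ===== CLAIM (what is proved, stated in full; the proofs are below) =====
def Claim_equal_actual : Prop := ∀ (N : Int), Dom_actual N → Spec_actual N (actual N)

-- ===== LEMMAS AND PROOFS =====

-- the literal value of A's raw (pre-dedup, pre-sort) table
def oksRaw : List Int := [4, 7, 8, 11, 14, 12, 15, 18, 21, 16, 19, 22, 25, 28, 20, 23, 26, 29, 32, 35, 24, 27, 30, 33, 36, 39, 42, 28, 31, 34, 37, 40, 43, 46, 49, 32, 35, 38, 41, 44, 47, 50, 53, 56, 36, 39, 42, 45, 48, 51, 54, 57, 60, 63, 40, 43, 46, 49, 52, 55, 58, 61, 64, 67, 70, 44, 47, 50, 53, 56, 59, 62, 65, 68, 71, 74, 77, 48, 51, 54, 57, 60, 63, 66, 69, 72, 75, 78, 81, 84, 52, 55, 58, 61, 64, 67, 70, 73, 76, 79, 82, 85, 88, 91, 56, 59, 62,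 65, 68, 71, 74, 77, 80, 83, 86, 89, 92, 95, 98, 60, 63, 66, 69, 72, 75, 78, 81, 84, 87, 90, 93, 96, 99, 64, 67, 70, 73, 76, 79, 82, 85, 88, 91, 94, 97, 100, 68, 71, 74, 77, 80, 83, 86, 89, 92, 95, 98, 72, 75, 78, 81, 84, 87, 90, 93, 96, 99, 76, 79, 82, 85, 88, 91, 94, 97, 100, 80, 83, 86, 89, 92, 95, 98, 84, 87, 90, 93, 96, 99, 88, 91, 94, 97, 100, 92, 95, 98, 96, 99, 100]

set_option maxRecDepth 100000 in
theorem buildOks_eq : buildOks = oksRaw := by decide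

-- A's answer depends only on MEMBERSHIP in the table; sorting and deduplication do not change it
theorem actual_eq_mem (N : Int) :
    actual N = if N ∈ oksRaw then "Yes" else "No" := by
  simp only [actual, List.contains_iff_mem, PySem.List.mem_sorted, PySem.Set.mem_ofList,
    buildOks_eq]

set_option maxRecDepth 100000 in
theorem oksRaw_bounds : ∀ x ∈ oksRaw, 1 ≤ x ∧ x ≤ 100 := by decide

set_option maxRecDepth 100000 in
theorem mid_agree : ∀ n : Nat, n < 100 →
    (if ((n : Int) + 1) ∈ oksRaw then "Yes" else "No") = actual_alt ((n : Int) + 1) := by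
  decide

-- ===== VERDICT (by name: the statement is the Claim_ definition above) =====
theorem actual_spec : Claim_equal_actual := by
  intro N _
  unfold Spec_actual
  rw [actual_eq_mem]
  by_cases h : N < 1 ∨ 100 < N
  · have hnot : N ∉ oksRaw := by
      intro hm
      rcases oksRaw_bounds N hm with ⟨h1, h2⟩
      omega
    rw [if_neg hnot]
    simp only [actual_alt, if_pos h]
  · push Not at h
    obtain ⟨h1, h2⟩ := h
    have hn : ((N - 1).toNat : Int) = N - 1 := by omega
    have hlt : (N - 1).toNat < 100 := by omega
    have := mid_agree (N - 1).toNat hlt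
    rw [hn] at this
    simpa using this
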